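-- pv_equiv track=rewrite | github.com/Radityahz/Information-Retrieval | 04/penugasan4.py | wordDocFre
-- ===== SOURCE A (Python) =====
-- def wordDocFre(vocab, inverted_index, doc_names):
--     df = {}
--     for doc_id, doc_name in doc_names.items():
--         df[doc_name] = {}
--         for word in vocab:
--             if doc_id in inverted_index.get(word, {}):
--                 df[doc_name][word] = len(inverted_index[word][doc_id])
--             else:
--                 df[doc_name][word] = 0
--     return df
-- ===== SOURCE B (Python) =====
-- def wordDocFre(vocab, inverted_index, doc_names):
--     vocab_set = set(vocab)
--     rows = {doc_id: dict.fromkeys(vocab, 0) for doc_id in doc_names}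
--     for word, postings in inverted_index.items():
--         if word in vocab_set:
--             for doc_id, positions in postings.items():
--                 if doc_id in rows:
--                     rows[doc_id][word] = len(positions)
--     return {doc_name: rows[doc_id] for doc_id, doc_name in doc_names.items()}
-- ===== Notes on version B (the rewrite author's own statement) =====
-- stated objective: alternative
-- what changed: A probes the inverted index once per (doc, word) pair; B zero-initialises a table keyed by doc_id (dict.fromkeys per doc), fills the nonzero cells in a single scatter pass over the inverted index, and renames rows to doc names at the end.
import Mathlib
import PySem

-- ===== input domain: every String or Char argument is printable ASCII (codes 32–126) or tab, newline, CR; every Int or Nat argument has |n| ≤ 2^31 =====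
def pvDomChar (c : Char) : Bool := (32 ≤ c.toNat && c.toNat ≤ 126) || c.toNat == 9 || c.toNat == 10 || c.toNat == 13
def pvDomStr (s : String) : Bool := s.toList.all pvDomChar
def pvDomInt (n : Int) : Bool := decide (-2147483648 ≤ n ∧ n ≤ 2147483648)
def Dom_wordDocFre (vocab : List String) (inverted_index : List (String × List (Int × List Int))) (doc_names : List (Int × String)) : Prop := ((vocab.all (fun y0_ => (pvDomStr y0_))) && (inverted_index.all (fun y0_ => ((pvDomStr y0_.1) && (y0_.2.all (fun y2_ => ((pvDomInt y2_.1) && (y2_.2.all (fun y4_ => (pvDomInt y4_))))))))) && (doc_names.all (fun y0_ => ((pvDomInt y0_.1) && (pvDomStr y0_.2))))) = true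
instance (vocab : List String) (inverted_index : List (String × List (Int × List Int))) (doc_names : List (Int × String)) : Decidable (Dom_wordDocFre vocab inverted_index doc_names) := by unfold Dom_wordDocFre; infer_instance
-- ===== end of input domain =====

-- B replaces A's per-(doc, word) probing of the inverted index by a zero-initialised table keyed by doc_id
-- plus a single scatter pass over the inverted index, renamed to doc names at the end (objective: alternative decomposition).

-- ===== PORT A =====
def wordDocFre (vocab : List String) (inverted_index : List (String × List (Int × List Int))) (doc_names : List (Int × String)) : List (String × List (String × Int)) :=
  let inv : PySem.Dict String (PySem.Dict Int (List Int)) :=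
    PySem.Dict.mk (inverted_index.map (fun p => (p.1, PySem.Dict.mk p.2)))
  let df : PySem.Dict String (PySem.Dict String Int) :=
    doc_names.foldl (fun df p =>
      df.insert p.2 (vocab.foldl (fun inn word =>
        if (inv.getD word PySem.Dict.empty).contains p.1 then
          inn.insert word (((inv.getD word PySem.Dict.empty).getD p.1 []).length : Int)
        else
          inn.insert word (0 : Int)) PySem.Dict.empty)) PySem.Dict.empty
  df.items.map (fun q => (q.1, q.2.items))

-- ===== PORT B =====
def wordDocFre_alt (vocab : List String) (inverted_index : List (String × List (Int × List Int))) (doc_names : List (Int × String)) : List (String × List (String × Int)) :=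
  let vocabSet : PySem.Set String := PySem.Set.ofList vocab
  let rows0 : PySem.Dict Int (PySem.Dict String Int) :=
    (doc_names.map (fun p => p.1)).foldl (fun d doc_id =>
      d.insert doc_id (vocab.foldl (fun z w => z.insert w (0 : Int)) PySem.Dict.empty)) PySem.Dict.empty
  let rows : PySem.Dict Int (PySem.Dict String Int) :=
    inverted_index.foldl (fun rows e =>
      if e.1 ∈ vocabSet then
        e.2.foldl (fun rows q =>
          if rows.contains q.1 then
            rows.modify q.1 PySem.Dict.empty (fun row => row.insert e.1 (q.2.length : Int))
          else rows) rows
      else rows) rows0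
  let df : PySem.Dict String (PySem.Dict String Int) :=
    doc_names.foldl (fun df p => df.insert p.2 (rows.getD p.1 PySem.Dict.empty)) PySem.Dict.empty
  df.items.map (fun q => (q.1, q.2.items))

-- ===== PRECONDITION & SPEC =====
-- Pre_ excludes association lists with a duplicated word key in the inverted index or a duplicated doc_id key
-- inside one posting list: such lists do not represent any Python dict (Python only ever sees the deduplicated
-- dict, on which A and B agree), while the Lean models of A (first-match lookup) and B (iteration) part ways there.
def Pre_wordDocFre (vocab : List String) (inverted_index : List (String × List (Int × List Int))) (doc_names : List (Int × String)) : Prop :=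
  (inverted_index.map (fun p => p.1)).Nodup ∧
  (∀ p ∈ inverted_index, (p.2.map (fun q => q.1)).Nodup)
instance (vocab : List String) (inverted_index : List (String × List (Int × List Int))) (doc_names : List (Int × String)) : Decidable (Pre_wordDocFre vocab inverted_index doc_names) := by unfold Pre_wordDocFre; infer_instance

def pvWitness_wordDocFre : List String × (List (String × List (Int × List Int))) × (List (Int × String)) :=
  (["a", "b"], [("a", [(0, [1, 2])]), ("c", [(1, [3])])], [(0, "d1"), (1, "d2")])

def Spec_wordDocFre (vocab : List String) (inverted_index : List (String × List (Int × List Int))) (doc_names : List (Int × String)) (out : List (String × List (String × Int))) : Prop := out = wordDocFre_alt vocab inverted_index doc_names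
instance (vocab : List String) (inverted_index : List (String × List (Int × List Int))) (doc_names : List (Int × String)) (out : List (String × List (String × Int))) : Decidable (Spec_wordDocFre vocab inverted_index doc_names out) := by unfold Spec_wordDocFre; infer_instance

-- ===== CLAIM (what is proved, stated in full; the proofs are below) =====
def Claim_equal_wordDocFre : Prop := ∀ (vocab : List String) (inverted_index : List (String × List (Int × List Int))) (doc_names : List (Int × String)), Dom_wordDocFre vocab inverted_index doc_names → Pre_wordDocFre vocab inverted_index doc_names → Spec_wordDocFre vocab inverted_index doc_names (wordDocFre vocab inverted_index doc_names)

-- ===== LEMMAS AND PROOFS =====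

-- the cell value A computes for document id and word w
def cellA (inverted_index : List (String × List (Int × List Int))) (id : Int) (w : String) : Int :=
  if ((PySem.Dict.mk (inverted_index.map (fun p => (p.1, PySem.Dict.mk p.2)))).getD w PySem.Dict.empty).contains id then
    ((((PySem.Dict.mk (inverted_index.map (fun p => (p.1, PySem.Dict.mk p.2)))).getD w PySem.Dict.empty).getD id []).length : Int)
  else 0

lemma keyed_insert {κ ν : Type} [BEq κ] [LawfulBEq κ] (ks : List κ) (g : κ → ν) (w0 : κ) (v : ν) (h : w0 ∈ ks) :
    (PySem.Dict.mk (ks.map (fun k => (k, g k)))).insert w0 v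
      = PySem.Dict.mk (ks.map (fun k => (k, if k == w0 then v else g k))) := by
  have hc : (PySem.Dict.mk (ks.map (fun k => (k, g k)))).contains w0 = true := by
    simp only [PySem.Dict.contains, List.any_eq_true]
    exact ⟨(w0, g w0), List.mem_map_of_mem h, by simp⟩
  apply PySem.Dict.ext
  rw [PySem.Dict.items_insert_of_contains _ _ hc]
  show (ks.map (fun k => (k, g k))).map _ = _
  rw [List.map_map]
  apply List.map_congr_left
  intro k _
  by_cases hk : k = w0
  · subst hk; simp
  · simp [hk]

lemma foldl_insert_fun {κ ν : Type} [BEq κ] [LawfulBEq κ] (f : κ → ν) : ∀ (l ks : List κ),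
    List.foldl (fun d w => d.insert w (f w)) (PySem.Dict.mk (ks.map (fun k => (k, f k)))) l
      = PySem.Dict.mk ((PySem.Set.update ks l).map (fun k => (k, f k))) := by
  intro l
  induction l with
  | nil => intro ks; simp [PySem.Set.update]
  | cons w l ih =>
    intro ks
    have hstep : (PySem.Dict.mk (ks.map (fun k => (k, f k)))).insert w (f w)
        = PySem.Dict.mk ((PySem.Set.add ks w).map (fun k => (k, f k))) := by
      by_cases h : w ∈ ks
      · rw [keyed_insert ks f w (f w) h]
        have hadd : PySem.Set.add ks w = ks := by simp [PySem.Set.add, h]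
        rw [hadd]
        congr 1
        apply List.map_congr_left
        intro k _
        by_cases hk : k = w
        · subst hk; simp
        · simp [hk]
      · have hc : (PySem.Dict.mk (ks.map (fun k => (k, f k)))).contains w = false := by
          simp only [PySem.Dict.contains, List.any_eq_false]
          intro p hp
          simp only [List.mem_map] at hp
          obtain ⟨k, hk, rfl⟩ := hp
          intro hkw
          have hk' : k = w := by simpa using hkw
          exact h (hk' ▸ hk)
        apply PySem.Dict.ext
        rw [PySem.Dict.items_insert_of_not_contains _ _ hc]
        have hadd : PySem.Set.add ks w = ks ++ [w] := by simp [PySem.Set.add, h]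
        rw [hadd]
        simp
    rw [List.foldl_cons, hstep, PySem.Set.update_cons]
    exact ih (PySem.Set.add ks w)

lemma rowA_eq {κ ν : Type} [BEq κ] [LawfulBEq κ] (f : κ → ν) (vocab : List κ) :
    List.foldl (fun d w => d.insert w (f w)) PySem.Dict.empty vocab
      = PySem.Dict.mk ((PySem.Set.ofList vocab).map (fun k => (k, f k))) := by
  have h := foldl_insert_fun f vocab []
  rw [PySem.Set.update_nil_left] at h
  simpa [PySem.Dict.empty] using h

-- the common normal form both programs reduce to
def commonForm (vocab : List String) (inverted_index : List (String × List (Int × List Int))) (doc_names : List (Int × String)) : List (String × List (String × Int)) :=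
  (doc_names.foldl (fun df p =>
      df.insert p.2 (PySem.Dict.mk ((PySem.Set.ofList vocab).map (fun w => (w, cellA inverted_index p.1 w)))))
    (PySem.Dict.empty : PySem.Dict String (PySem.Dict String Int))).items.map (fun q => (q.1, q.2.items))

-- A's output, characterised
lemma A_norm (vocab : List String) (inverted_index : List (String × List (Int × List Int))) (doc_names : List (Int × String)) :
    wordDocFre vocab inverted_index doc_names = commonForm vocab inverted_index doc_names := by
  simp only [wordDocFre, commonForm]
  congr 2
  apply PySem.List.foldl_congr_mem
  intro df p _
  congr 1
  have hfun : (fun (inn : PySem.Dict String Int) word =>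
      if ((PySem.Dict.mk (inverted_index.map (fun p => (p.1, PySem.Dict.mk p.2)))).getD word PySem.Dict.empty).contains p.1 then
        inn.insert word ((((PySem.Dict.mk (inverted_index.map (fun p => (p.1, PySem.Dict.mk p.2)))).getD word PySem.Dict.empty).getD p.1 []).length : Int)
      else inn.insert word (0 : Int))
      = fun (inn : PySem.Dict String Int) word => inn.insert word (cellA inverted_index p.1 word) := by
    funext inn w
    by_cases hcw : ((PySem.Dict.mk (inverted_index.map (fun p => (p.1, PySem.Dict.mk p.2)))).getD w PySem.Dict.empty).contains p.1
    · simp [cellA, hcw]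
    · simp [cellA, hcw]
  rw [hfun, rowA_eq]

-- lookup in a key-indexed map
lemma keyed_get? {κ ν : Type} [BEq κ] [LawfulBEq κ] (r : κ → ν) :
    ∀ (ks : List κ) (k : κ),
    (PySem.Dict.mk (ks.map (fun i => (i, r i)))).get? k = if k ∈ ks then some (r k) else none := by
  intro ks
  induction ks with
  | nil => intro k; simp [PySem.Dict.get?]
  | cons a ks ih =>
    intro k
    rw [List.map_cons, PySem.Dict.get?_mk_cons]
    by_cases hak : a = k
    · subst hak; simp
    · have : (a == k) = false := beq_eq_false_iff_ne.mpr hak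
      rw [this]
      simp only [Bool.false_eq_true, if_false, ih k, List.mem_cons]
      by_cases hk : k ∈ ks
      · simp [hk]
      · simp [hk, Ne.symm hak]

lemma keyed_contains {κ ν : Type} [BEq κ] [LawfulBEq κ] (r : κ → ν) (ks : List κ) (k : κ) :
    (PySem.Dict.mk (ks.map (fun i => (i, r i)))).contains k = decide (k ∈ ks) := by
  rw [PySem.Dict.contains_eq_isSome_get?, keyed_get?]
  by_cases hk : k ∈ ks <;> simp [hk]

-- modifying a key-indexed map at a present key updates exactly that key's value
lemma keyed_modify {κ ν : Type} [BEq κ] [LawfulBEq κ] (ks : List κ) (r : κ → ν) (k : κ) (dflt : ν) (g : ν → ν) (h : k ∈ ks) :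
    (PySem.Dict.mk (ks.map (fun i => (i, r i)))).modify k dflt g
      = PySem.Dict.mk (ks.map (fun i => (i, if i == k then g (r i) else r i))) := by
  simp only [PySem.Dict.modify, PySem.Dict.getD, keyed_get? r ks k, if_pos h, Option.getD_some]
  refine (keyed_insert ks r k (g (r k)) h).trans ?_
  congr 1
  apply List.map_congr_left
  intro i _
  by_cases hik : i = k
  · subst hik; simp
  · simp [hik]

-- one word's posting list scattered into the id-keyed table
lemma scatter_posts (ks : List Int) (w : String) :
    ∀ (posts : List (Int × List Int)) (r : Int → PySem.Dict String Int), (posts.map (fun q => q.1)).Nodup →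
    List.foldl (fun rows q =>
        if rows.contains q.1 then
          rows.modify q.1 PySem.Dict.empty (fun row => row.insert w (q.2.length : Int))
        else rows)
      (PySem.Dict.mk (ks.map (fun i => (i, r i)))) posts
      = PySem.Dict.mk (ks.map (fun i => (i,
          match (PySem.Dict.mk posts).get? i with
          | some ps => if i ∈ ks then (r i).insert w (ps.length : Int) else r i
          | none => r i))) := by
  intro posts
  induction posts with
  | nil =>
    intro r _
    simp [PySem.Dict.get?]
  | cons q posts ih =>
    intro r hnd
    obtain ⟨qa, qb⟩ := q
    rw [List.map_cons, List.nodup_cons] at hnd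
    obtain ⟨hq1, hnd'⟩ := hnd
    rw [List.foldl_cons, keyed_contains r ks qa]
    by_cases hm : qa ∈ ks
    · rw [if_pos (by simp [hm])]
      rw [keyed_modify ks r qa PySem.Dict.empty _ hm]
      refine (ih (fun i => if i == qa then (r i).insert w ((qa, qb).2.length : Int) else r i) hnd').trans ?_
      congr 1
      apply List.map_congr_left
      intro i hi
      rw [PySem.Dict.get?_mk_cons]
      by_cases hiq : i = qa
      · have hnone : (PySem.Dict.mk posts).get? i = none := by
          rw [PySem.Dict.get?_eq_none_iff_not_mem_keys, PySem.Dict.keys_mk, hiq]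
          exact hq1
        have hqa : (qa == i) = true := by simp [hiq]
        rw [hqa, hnone]
        simp [hiq, hm]
      · have hqa : (qa == i) = false := beq_eq_false_iff_ne.mpr (Ne.symm hiq)
        have hiq' : (i == qa) = false := beq_eq_false_iff_ne.mpr hiq
        rw [hqa]
        have hcollapse : (if (i == qa) = true then (r i).insert w ((qa, qb).2.length : Int) else r i) = r i := by
          rw [hiq']; simp
        simp only [hcollapse]
        simp
    · rw [if_neg (by simp [hm])]
      refine (ih r hnd').trans ?_
      congr 1
      apply List.map_congr_left
      intro i hi
      have hiq : (qa == i) = false := beq_eq_false_iff_ne.mpr (fun hh => hm (hh ▸ hi))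
      rw [PySem.Dict.get?_mk_cons, hiq]
      simp

-- the per-row effect of the whole scatter loop
def rowFrom (vs : List String) (l : List (String × List (Int × List Int))) (id : Int) (row : PySem.Dict String Int) : PySem.Dict String Int :=
  l.foldl (fun row e =>
    if e.1 ∈ vs then
      match (PySem.Dict.mk e.2).get? id with
      | some ps => row.insert e.1 (ps.length : Int)
      | none => row
    else row) row

lemma scatter_all (vocab : List String) (ks : List Int) :
    ∀ (inv : List (String × List (Int × List Int))) (r : Int → PySem.Dict String Int),
    (∀ e ∈ inv, (e.2.map (fun q => q.1)).Nodup) →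
    List.foldl (fun rows e =>
        if e.1 ∈ PySem.Set.ofList vocab then
          List.foldl (fun rows q =>
            if rows.contains q.1 then
              rows.modify q.1 PySem.Dict.empty (fun row => row.insert e.1 (q.2.length : Int))
            else rows) rows e.2
        else rows)
      (PySem.Dict.mk (ks.map (fun i => (i, r i)))) inv
      = PySem.Dict.mk (ks.map (fun i => (i, rowFrom (PySem.Set.ofList vocab) inv i (r i)))) := by
  intro inv
  induction inv with
  | nil =>
    intro r _
    simp [rowFrom]
  | cons e inv ih =>
    intro r hN2'
    have hN2e := hN2' e (List.mem_cons_self)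
    have hN2r : ∀ x ∈ inv, (x.2.map (fun q => q.1)).Nodup := fun x hx => hN2' x (List.mem_cons_of_mem _ hx)
    rw [List.foldl_cons]
    by_cases he : e.1 ∈ PySem.Set.ofList vocab
    · rw [if_pos he]
      rw [scatter_posts ks e.1 e.2 r hN2e]
      refine (ih (fun i => match (PySem.Dict.mk e.2).get? i with
        | some ps => if i ∈ ks then (r i).insert e.1 (ps.length : Int) else r i
        | none => r i) hN2r).trans ?_
      congr 1
      apply List.map_congr_left
      intro i hi
      simp only [rowFrom, List.foldl_cons]
      rw [if_pos he]
      cases hg : (PySem.Dict.mk e.2).get? i <;> simp [hg, hi]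
    · rw [if_neg he]
      refine (ih r hN2r).trans ?_
      congr 1
      apply List.map_congr_left
      intro i _
      simp only [rowFrom, List.foldl_cons]
      rw [if_neg he]

-- the per-word effect of the scatter on one row, as a function update
def stepCell (vs : List String) (id : Int) (e : String × List (Int × List Int)) (g : String → Int) : String → Int :=
  fun w =>
    if e.1 ∈ vs then
      match (PySem.Dict.mk e.2).get? id with
      | some ps => if w == e.1 then (ps.length : Int) else g w
      | none => g w
    else g w

def cellFrom (vs : List String) (id : Int) : List (String × List (Int × List Int)) → (String → Int) → String → Int
  | [], g => g
  | e :: l, g => cellFrom vs id l (stepCell vs id e g)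

lemma row_fold (vocab : List String) (id : Int) :
    ∀ (l : List (String × List (Int × List Int))) (g : String → Int),
    rowFrom (PySem.Set.ofList vocab) l id (PySem.Dict.mk ((PySem.Set.ofList vocab).map (fun w => (w, g w))))
      = PySem.Dict.mk ((PySem.Set.ofList vocab).map (fun w => (w, cellFrom (PySem.Set.ofList vocab) id l g w))) := by
  intro l
  induction l with
  | nil =>
    intro g
    simp [rowFrom, cellFrom]
  | cons e l ih =>
    intro g
    have hstep : (if e.1 ∈ PySem.Set.ofList vocab then
        match (PySem.Dict.mk e.2).get? id with
        | some ps => (PySem.Dict.mk ((PySem.Set.ofList vocab).map (fun w => (w, g w)))).insert e.1 (ps.length : Int)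
        | none => PySem.Dict.mk ((PySem.Set.ofList vocab).map (fun w => (w, g w)))
      else PySem.Dict.mk ((PySem.Set.ofList vocab).map (fun w => (w, g w))))
        = PySem.Dict.mk ((PySem.Set.ofList vocab).map (fun w => (w, stepCell (PySem.Set.ofList vocab) id e g w))) := by
      by_cases he : e.1 ∈ PySem.Set.ofList vocab
      · rw [if_pos he]
        cases hg : (PySem.Dict.mk e.2).get? id with
        | some ps =>
          show (PySem.Dict.mk ((PySem.Set.ofList vocab).map (fun w => (w, g w)))).insert e.1 (ps.length : Int) = _
          rw [keyed_insert (PySem.Set.ofList vocab) g e.1 (ps.length : Int) he]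
          congr 1
          apply List.map_congr_left
          intro k _
          simp [stepCell, he, hg]
        | none =>
          show PySem.Dict.mk ((PySem.Set.ofList vocab).map (fun w => (w, g w))) = _
          congr 1
          apply List.map_congr_left
          intro k _
          simp [stepCell, he, hg]
      · rw [if_neg he]
        congr 1
        apply List.map_congr_left
        intro k _
        simp [stepCell, he]
    show List.foldl _ _ (e :: l) = _
    rw [List.foldl_cons, hstep]
    exact ih (stepCell (PySem.Set.ofList vocab) id e g)

lemma get?_mk_map_values {α β : Type} (h : α → β) :
    ∀ (l : List (String × α)) (w : String),
    (PySem.Dict.mk (l.map (fun p => (p.1, h p.2)))).get? w = ((PySem.Dict.mk l).get? w).map h := by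
  intro l
  induction l with
  | nil => intro w; simp [PySem.Dict.get?]
  | cons p l ih =>
    intro w
    obtain ⟨a, b⟩ := p
    rw [List.map_cons, PySem.Dict.get?_mk_cons, PySem.Dict.get?_mk_cons]
    cases h1 : (a == w) <;> simp [h1, ih]

lemma cellFrom_spec (vocab : List String) (id : Int) :
    ∀ (l : List (String × List (Int × List Int))) (g : String → Int) (w : String), (l.map (fun p => p.1)).Nodup →
    cellFrom (PySem.Set.ofList vocab) id l g w
      = if w ∈ PySem.Set.ofList vocab then
          (match (PySem.Dict.mk l).get? w with
           | some posts =>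
             (match (PySem.Dict.mk posts).get? id with
              | some ps => (ps.length : Int)
              | none => g w)
           | none => g w)
        else g w := by
  intro l
  induction l with
  | nil =>
    intro g w _
    by_cases hw : w ∈ PySem.Set.ofList vocab <;> simp [cellFrom, PySem.Dict.get?, hw]
  | cons e l ih =>
    intro g w hnd
    obtain ⟨ea, eb⟩ := e
    rw [List.map_cons, List.nodup_cons] at hnd
    obtain ⟨he1, hnd'⟩ := hnd
    show cellFrom (PySem.Set.ofList vocab) id l (stepCell (PySem.Set.ofList vocab) id (ea, eb) g) w = _
    rw [ih (stepCell (PySem.Set.ofList vocab) id (ea, eb) g) w hnd']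
    by_cases hw : w ∈ PySem.Set.ofList vocab
    · rw [if_pos hw, if_pos hw, PySem.Dict.get?_mk_cons]
      by_cases hwe : w = ea
      · have hnone : (PySem.Dict.mk l).get? w = none := by
          rw [PySem.Dict.get?_eq_none_iff_not_mem_keys, PySem.Dict.keys_mk, hwe]
          exact he1
        have hea : (ea == w) = true := by simp [hwe]
        rw [hnone, hea]
        have hev : ea ∈ PySem.Set.ofList vocab := hwe ▸ hw
        cases hg : (PySem.Dict.mk eb).get? id <;> simp [stepCell, hev, hg, hwe]
      · have hea : (ea == w) = false := beq_eq_false_iff_ne.mpr (Ne.symm hwe)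
        have hwe' : (w == ea) = false := beq_eq_false_iff_ne.mpr hwe
        have hstep : stepCell (PySem.Set.ofList vocab) id (ea, eb) g w = g w := by
          by_cases hev : ea ∈ PySem.Set.ofList vocab
          · cases hg : (PySem.Dict.mk eb).get? id <;> simp [stepCell, hev, hg, hwe']
          · simp [stepCell, hev]
        rw [hea, hstep]
        simp
    · rw [if_neg hw, if_neg hw]
      by_cases hev : ea ∈ PySem.Set.ofList vocab
      · have hwe' : (w == ea) = false := beq_eq_false_iff_ne.mpr (fun hh => hw (hh ▸ hev))
        cases hg : (PySem.Dict.mk eb).get? id <;> simp [stepCell, hev, hg, hwe']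
      · simp [stepCell, hev]

lemma cell_final (vocab : List String) (inverted_index : List (String × List (Int × List Int))) (id : Int) (w : String)
    (hw : w ∈ PySem.Set.ofList vocab) (hN1 : (inverted_index.map (fun p => p.1)).Nodup) :
    cellFrom (PySem.Set.ofList vocab) id inverted_index (fun _ => 0) w = cellA inverted_index id w := by
  rw [cellFrom_spec vocab id inverted_index (fun _ => 0) w hN1, if_pos hw]
  unfold cellA
  simp only [PySem.Dict.getD, get?_mk_map_values]
  cases hg : (PySem.Dict.mk inverted_index).get? w with
  | none => simp [PySem.Dict.contains, PySem.Dict.empty]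
  | some posts =>
    simp only [Option.map_some, Option.getD_some]
    cases hp : (PySem.Dict.mk posts).get? id with
    | none =>
      have hcf : (PySem.Dict.mk posts).contains id = false := by
        rw [PySem.Dict.contains_eq_isSome_get?, hp]; rfl
      simp [hcf]
    | some ps =>
      have hct : (PySem.Dict.mk posts).contains id = true := by
        rw [PySem.Dict.contains_eq_isSome_get?, hp]; rfl
      simp [hct]

lemma B_norm (vocab : List String) (inverted_index : List (String × List (Int × List Int))) (doc_names : List (Int × String))
    (hN1 : (inverted_index.map (fun p => p.1)).Nodup)
    (hN2 : ∀ p ∈ inverted_index, (p.2.map (fun q => q.1)).Nodup) :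
    wordDocFre_alt vocab inverted_index doc_names = commonForm vocab inverted_index doc_names := by
  simp only [wordDocFre_alt, commonForm]
  have hzrow : vocab.foldl (fun z w => z.insert w (0 : Int)) PySem.Dict.empty
      = PySem.Dict.mk ((PySem.Set.ofList vocab).map (fun k => (k, (0 : Int)))) := rowA_eq (fun _ => (0 : Int)) vocab
  have hrows0 : ((doc_names.map (fun p => p.1)).foldl
        (fun d doc_id => d.insert doc_id (vocab.foldl (fun z w => z.insert w (0 : Int)) PySem.Dict.empty)) PySem.Dict.empty)
      = PySem.Dict.mk ((PySem.Set.ofList (doc_names.map (fun p => p.1))).map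
          (fun i => (i, PySem.Dict.mk ((PySem.Set.ofList vocab).map (fun k => (k, (0 : Int))))))) := by
    have hfun : (fun (d : PySem.Dict Int (PySem.Dict String Int)) doc_id =>
        d.insert doc_id (vocab.foldl (fun z w => z.insert w (0 : Int)) PySem.Dict.empty))
        = fun (d : PySem.Dict Int (PySem.Dict String Int)) doc_id =>
            d.insert doc_id (PySem.Dict.mk ((PySem.Set.ofList vocab).map (fun k => (k, (0 : Int))))) := by
      funext d i
      rw [hzrow]
    rw [hfun]
    exact rowA_eq (fun _ => PySem.Dict.mk ((PySem.Set.ofList vocab).map (fun k => (k, (0 : Int))))) (doc_names.map (fun p => p.1))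
  rw [hrows0]
  have hs : List.foldl (fun rows e =>
        if e.1 ∈ PySem.Set.ofList vocab then
          List.foldl (fun rows q =>
            if rows.contains q.1 then
              rows.modify q.1 PySem.Dict.empty (fun row => row.insert e.1 (q.2.length : Int))
            else rows) rows e.2
        else rows)
      (PySem.Dict.mk ((PySem.Set.ofList (doc_names.map (fun p => p.1))).map
        (fun i => (i, PySem.Dict.mk ((PySem.Set.ofList vocab).map (fun k => (k, (0 : Int)))))))) inverted_index
      = PySem.Dict.mk ((PySem.Set.ofList (doc_names.map (fun p => p.1))).map
          (fun i => (i, rowFrom (PySem.Set.ofList vocab) inverted_index i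
            (PySem.Dict.mk ((PySem.Set.ofList vocab).map (fun k => (k, (0 : Int)))))))) :=
    scatter_all vocab (PySem.Set.ofList (doc_names.map (fun p => p.1))) inverted_index
      (fun _ => PySem.Dict.mk ((PySem.Set.ofList vocab).map (fun k => (k, (0 : Int))))) hN2
  rw [hs]
  have hrow : ∀ i : Int,
      rowFrom (PySem.Set.ofList vocab) inverted_index i (PySem.Dict.mk ((PySem.Set.ofList vocab).map (fun k => (k, (0 : Int)))))
        = PySem.Dict.mk ((PySem.Set.ofList vocab).map (fun w => (w, cellA inverted_index i w))) := by
    intro i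
    rw [row_fold vocab i inverted_index (fun _ => (0 : Int))]
    congr 1
    apply List.map_congr_left
    intro w hw
    rw [cell_final vocab inverted_index i w hw hN1]
  congr 2
  apply PySem.List.foldl_congr_mem doc_names _ _ _
  intro df p hp
  have hp1 : p.1 ∈ PySem.Set.ofList (doc_names.map (fun q => q.1)) :=
    (PySem.Set.mem_ofList _ _).mpr (List.mem_map_of_mem hp)
  have hget : (PySem.Dict.mk ((PySem.Set.ofList (doc_names.map (fun q => q.1))).map
      (fun i => (i, rowFrom (PySem.Set.ofList vocab) inverted_index i
        (PySem.Dict.mk ((PySem.Set.ofList vocab).map (fun k => (k, (0 : Int))))))))).getD p.1 PySem.Dict.empty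
      = PySem.Dict.mk ((PySem.Set.ofList vocab).map (fun w => (w, cellA inverted_index p.1 w))) := by
    rw [PySem.Dict.getD, keyed_get?, if_pos hp1, Option.getD_some, hrow p.1]
  rw [hget]

-- ===== VERDICT (by name: the statement is the Claim_ definition above) =====
theorem wordDocFre_spec : Claim_equal_wordDocFre := by
  intro vocab inverted_index doc_names _hDom hPre
  obtain ⟨hN1, hN2⟩ := hPre
  unfold Spec_wordDocFre
  rw [A_norm vocab inverted_index doc_names, B_norm vocab inverted_index doc_names hN1 hN2]
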